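-- pv_equiv track=rewrite | github.com/bekirs01/open-webui | backend/open_webui/utils/output_language_guard.py | _turkish_substring_hints
-- ===== SOURCE A (Python) =====
-- def _turkish_substring_hints(s: str) -> bool:
--     low = s.lower()
--     needles = (
--         ' için ',
--         ' nasıl ',
--         ' nerede ',
--         ' kaç ',
--         ' nereli',
--         ' doğdu',
--         ' dogdu',
--         ' değil ',
--         ' degil ',
--         ' türk',
--         ' turk ',
--         ' bir ',
--         ' ve ',
--         ' mi?',
--         ' mı?',
--     )
--     return any(n in low for n in needles)
-- ===== SOURCE B (Python) =====
-- def _turkish_substring_hints(s: str) -> bool: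
--     low = s.lower()
--     needles = (
--         ' için ',
--         ' nasıl ',
--         ' nerede ',
--         ' kaç ',
--         ' nereli',
--         ' doğdu',
--         ' dogdu',
--         ' değil ',
--         ' degil ',
--         ' türk',
--         ' turk ',
--         ' bir ',
--         ' ve ',
--         ' mi?',
--         ' mı?',
--     )
--     # every needle begins with a space: one scan over the text, testing all
--     # needles together (startswith with a tuple) only at space positions
--     for i, ch in enumerate(low):
--         if ch == ' ' and low.startswith(needles, i):
--             return True
--     return False
-- ===== Notes on version B (the rewrite author's own statement) =====
-- stated objective: alternative
-- what changed: Instead of running a full substring scan of the text for each of the 15 needles (any(n in low)), B makes one left-to-right pass over the lowercased text and, only at positions holding a space (all needles start with a space), tests all needles at once with a single anchored startswith(tuple, i) call.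
import Mathlib
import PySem

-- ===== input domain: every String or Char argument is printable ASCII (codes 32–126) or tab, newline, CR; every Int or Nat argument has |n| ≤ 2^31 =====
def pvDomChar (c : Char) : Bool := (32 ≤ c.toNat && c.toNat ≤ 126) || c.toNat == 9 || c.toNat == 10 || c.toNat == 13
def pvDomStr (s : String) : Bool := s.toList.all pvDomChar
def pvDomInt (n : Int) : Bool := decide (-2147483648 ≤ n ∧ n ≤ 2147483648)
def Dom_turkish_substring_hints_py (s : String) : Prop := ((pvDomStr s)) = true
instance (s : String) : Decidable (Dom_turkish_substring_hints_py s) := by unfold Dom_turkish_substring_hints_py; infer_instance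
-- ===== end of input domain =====

-- B replaces the per-needle `in` scans with one pass over the text, testing all needles
-- (each starts with a space) only at space positions; equivalence proved for all strings.


-- ===== PORT A =====
-- the needle tuple of A (string literals, in source order)
def pvNeedlesA : List String :=
  [" için ", " nasıl ", " nerede ", " kaç ", " nereli", " doğdu", " dogdu",
   " değil ", " degil ", " türk", " turk ", " bir ", " ve ", " mi?", " mı?"]

def turkish_substring_hints_py (s : String) : Bool :=
  let low := PySem.Str.lower s
  pvNeedlesA.any (fun n => PySem.Str.isIn n low)

-- ===== PORT B =====
-- B works position-wise on the characters; its needle tuple as character lists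
def pvNeedlesB : List (List Char) :=
  [" için ".toList, " nasıl ".toList, " nerede ".toList, " kaç ".toList, " nereli".toList,
   " doğdu".toList, " dogdu".toList, " değil ".toList, " degil ".toList, " türk".toList,
   " turk ".toList, " bir ".toList, " ve ".toList, " mi?".toList, " mı?".toList]

-- B's loop: walk the tails of the lowercased text; at a tail starting with ' ',
-- test whether some needle is a prefix of that tail (Python's low.startswith(needles, i))
def pvScanTails (cs : List Char) : Bool :=
  match cs with
  | [] => false
  | c :: rest =>
      (c == ' ' && pvNeedlesB.any (fun n => PySem.Chars.startswith (c :: rest) n))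
      || pvScanTails rest

def turkish_substring_hints_py_alt (s : String) : Bool :=
  pvScanTails (PySem.Str.lower s).toList

-- ===== PRECONDITION & SPEC =====
def Spec_turkish_substring_hints_py (s : String) (out : Bool) : Prop := out = turkish_substring_hints_py_alt s
instance (s : String) (out : Bool) : Decidable (Spec_turkish_substring_hints_py s out) := by unfold Spec_turkish_substring_hints_py; infer_instance

-- ===== CLAIM (what is proved, stated in full; the proofs are below) =====
def Claim_equal_turkish_substring_hints_py : Prop := ∀ (s : String), Dom_turkish_substring_hints_py s → Spec_turkish_substring_hints_py s (turkish_substring_hints_py s)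

-- ===== LEMMAS AND PROOFS =====

-- every needle starts with a space (hence is nonempty)
theorem pvNeedlesB_head : ∀ n ∈ pvNeedlesB, n.head? = some ' ' := by decide

-- B's scan computes "some needle is an infix" — A's test
theorem pvScanTails_eq_any_infix (cs : List Char) :
    pvScanTails cs = pvNeedlesB.any (fun n => decide (n <:+: cs)) := by
  induction cs with
  | nil => decide
  | cons c rest ih =>
      rw [Bool.eq_iff_iff]
      simp only [pvScanTails, Bool.or_eq_true, Bool.and_eq_true, List.any_eq_true,
        decide_eq_true_eq, ih, PySem.Chars.startswith_iff, List.infix_cons_iff, beq_iff_eq]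
      constructor
      · rintro (⟨hc, n, hn, hp⟩ | ⟨n, hn, hi⟩)
        · exact ⟨n, hn, Or.inl hp⟩
        · exact ⟨n, hn, Or.inr hi⟩
      · rintro ⟨n, hn, hp | hi⟩
        · refine Or.inl ⟨?_, n, hn, hp⟩
          have hh := pvNeedlesB_head n hn
          obtain ⟨u, hu⟩ := hp
          cases n with
          | nil => simp at hh
          | cons a t =>
              simp only [List.head?_cons, Option.some.injEq] at hh
              injection hu with h1 _
              exact h1 ▸ hh
        · exact Or.inr ⟨n, hn, hi⟩

-- ===== VERDICT (by name: the statement is the Claim_ definition above) =====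
theorem turkish_substring_hints_py_spec : Claim_equal_turkish_substring_hints_py := by
  intro s _
  unfold Spec_turkish_substring_hints_py turkish_substring_hints_py turkish_substring_hints_py_alt
  rw [pvScanTails_eq_any_infix, show pvNeedlesB = pvNeedlesA.map String.toList from rfl,
    List.any_map]
  refine List.any_congr rfl (fun n => ?_)
  rw [Bool.eq_iff_iff]
  simp [PySem.Chars.isIn_iff_infix, Function.comp]
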